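-- pv_equiv track=rewrite | github.com/google-gazzza/algorithm | leetcode/medium/1769-minimum-number-of-operations-to-move-all-balls-to-each-box/1769-minimum-number-of-operations-to-move-all-balls-to-each-box.py | accumulateToRight
-- ===== SOURCE A (Python) =====
-- def accumulateToRight(boxes):
--     operations = 0
--     result = []
--     item_count = 0
--
--     for item in boxes:
--         result.append(operations)
--         if item:
--             item_count += 1
--         operations += (item_count)
--
--     return result
-- ===== SOURCE B (Python) =====
-- def accumulateToRight(boxes):
--     ball_count = 0
--     position_sum = 0
--     result = []
--     for i, item in enumerate(boxes):
--         result.append(ball_count * i - position_sum)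
--         if item:
--             ball_count += 1
--             position_sum += i
--     return result
-- ===== Notes on version B (the rewrite author's own statement) =====
-- stated objective: alternative
-- what changed: Replaces A's second-order accumulator (operations += running item_count each step) with the closed-form moment identity: maintain ball_count and position_sum of truthy indices and emit ball_count*i - position_sum directly.
import Mathlib
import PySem

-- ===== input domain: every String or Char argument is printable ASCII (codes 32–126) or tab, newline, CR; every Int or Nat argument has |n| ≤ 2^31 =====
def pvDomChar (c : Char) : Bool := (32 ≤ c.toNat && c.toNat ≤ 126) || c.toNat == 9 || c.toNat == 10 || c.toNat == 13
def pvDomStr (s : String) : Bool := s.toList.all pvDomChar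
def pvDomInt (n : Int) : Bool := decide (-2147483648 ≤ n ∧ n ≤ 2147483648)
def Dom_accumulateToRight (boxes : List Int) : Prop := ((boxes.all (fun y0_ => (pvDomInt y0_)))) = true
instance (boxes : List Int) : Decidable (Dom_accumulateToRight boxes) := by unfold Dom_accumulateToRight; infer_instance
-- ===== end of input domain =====

-- B replaces A's second-order accumulator with the closed-form moment identity ball_count*i - position_sum (alternative decomposition, same cost).


-- ===== PORT A =====
def accumulateToRight (boxes : List Int) : List Int :=
  (boxes.foldl (fun (st : Int × List Int × Int) item =>
      let operations := st.1
      let result := st.2.1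
      let item_count := st.2.2
      let result := result ++ [operations]
      let item_count := if item ≠ 0 then item_count + 1 else item_count
      (operations + item_count, result, item_count))
    (0, [], 0)).2.1

-- ===== PORT B =====
def accumulateToRight_alt (boxes : List Int) : List Int :=
  ((PySem.List.enumerate boxes 0).foldl (fun (st : Int × Int × List Int) p =>
      let i := p.1
      let item := p.2
      let ball_count := st.1
      let position_sum := st.2.1
      let result := st.2.2
      let result := result ++ [ball_count * i - position_sum]
      if item ≠ 0 then (ball_count + 1, position_sum + i, result)
      else (ball_count, position_sum, result))
    (0, 0, [])).2.2

-- ===== PRECONDITION & SPEC =====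
def Spec_accumulateToRight (boxes : List Int) (out : List Int) : Prop := out = accumulateToRight_alt boxes
instance (boxes : List Int) (out : List Int) : Decidable (Spec_accumulateToRight boxes out) := by unfold Spec_accumulateToRight; infer_instance

-- ===== CLAIM (what is proved, stated in full; the proofs are below) =====
def Claim_equal_accumulateToRight : Prop := ∀ (boxes : List Int), Dom_accumulateToRight boxes → Spec_accumulateToRight boxes (accumulateToRight boxes)

-- ===== LEMMAS AND PROOFS =====

-- Coupling invariant: A's running `operations` equals ball_count * i - position_sum
-- at the enumerate index where B currently stands.
theorem accTR_key (xs : List Int) : ∀ (s ops cnt ps : Int) (res : List Int),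
    ops = cnt * s - ps →
    (xs.foldl (fun (st : Int × List Int × Int) item =>
        let operations := st.1
        let result := st.2.1
        let item_count := st.2.2
        let result := result ++ [operations]
        let item_count := if item ≠ 0 then item_count + 1 else item_count
        (operations + item_count, result, item_count))
      (ops, res, cnt)).2.1 =
    ((PySem.List.enumerate xs s).foldl (fun (st : Int × Int × List Int) p =>
        let i := p.1
        let item := p.2
        let ball_count := st.1
        let position_sum := st.2.1
        let result := st.2.2
        let result := result ++ [ball_count * i - position_sum]
        if item ≠ 0 then (ball_count + 1, position_sum + i, result)
        else (ball_count, position_sum, result))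
      (cnt, ps, res)).2.2 := by
  induction xs with
  | nil => intro s ops cnt ps res h; simp [PySem.List.enumerate_nil]
  | cons x xs ih =>
    intro s ops cnt ps res h
    subst h
    rw [PySem.List.enumerate_cons]
    simp only [List.foldl_cons]
    by_cases hx : x = 0
    · have H := ih (s + 1) (cnt * s - ps + cnt) cnt ps
        (res ++ [cnt * s - ps]) (by ring)
      simpa [hx] using H
    · have H := ih (s + 1) (cnt * s - ps + (cnt + 1)) (cnt + 1) (ps + s)
        (res ++ [cnt * s - ps]) (by ring)
      simpa [hx] using H

-- ===== VERDICT (by name: the statement is the Claim_ definition above) =====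
theorem accumulateToRight_spec : Claim_equal_accumulateToRight := by
  intro boxes _
  unfold Spec_accumulateToRight accumulateToRight accumulateToRight_alt
  exact accTR_key boxes 0 0 0 0 [] (by ring)
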